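-- pv_equiv track=rewrite | github.com/harryneopotter/Bajaj | generate_report.py | is_valid_product
-- ===== SOURCE A (Python) =====
-- def is_valid_product(name):
--     if not name or len(name) < 5:
--         return False
--     if name.isdigit():
--         return False
--     garbage_patterns = ["weight:", "appx.", "/-", ",", "00", "000", "(after", "discount)",
--                        "ground", "mm", "side", "projection", "length:", "height:", "fastener",
--                        "installation charge", "cartage", "extra",
--                        "help protect", "to use of", "wheels to", "use of branded"]
--     name_lower = name.lower()
--     for pattern in garbage_patterns:
--         if pattern in name_lower:
--             return False
--     return True
-- ===== SOURCE B (Python) =====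
-- GARBAGE_PATTERNS = ["weight:", "appx.", "/-", ",", "00", "000", "(after", "discount)",
--                     "ground", "mm", "side", "projection", "length:", "height:", "fastener",
--                     "installation charge", "cartage", "extra",
--                     "help protect", "to use of", "wheels to", "use of branded"]
-- PATTERN_LENGTHS = sorted({len(p) for p in GARBAGE_PATTERNS})
-- PATTERNS_BY_LEN = {L: {p for p in GARBAGE_PATTERNS if len(p) == L} for L in PATTERN_LENGTHS}
--
-- def is_valid_product(name):
--     if not name or len(name) < 5:
--         return False
--     if name.isdigit():
--         return False
--     low = name.lower()
--     # group the patterns by length; for each length slide one window over the name and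
--     # test the window stream against that length's pattern set by set disjointness
--     for L in PATTERN_LENGTHS:
--         if not PATTERNS_BY_LEN[L].isdisjoint(low[i:i+L] for i in range(len(low) - L + 1)):
--             return False
--     return True
-- ===== Notes on version B (the rewrite author's own statement) =====
-- stated objective: alternative
-- what changed: B groups the garbage patterns into per-length sets once, then for each occurring pattern length slides one window of that length over the lowered name and tests the window stream against that length's pattern set by set disjointness, instead of A's loop running one whole-string substring search per pattern.
import Mathlib
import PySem

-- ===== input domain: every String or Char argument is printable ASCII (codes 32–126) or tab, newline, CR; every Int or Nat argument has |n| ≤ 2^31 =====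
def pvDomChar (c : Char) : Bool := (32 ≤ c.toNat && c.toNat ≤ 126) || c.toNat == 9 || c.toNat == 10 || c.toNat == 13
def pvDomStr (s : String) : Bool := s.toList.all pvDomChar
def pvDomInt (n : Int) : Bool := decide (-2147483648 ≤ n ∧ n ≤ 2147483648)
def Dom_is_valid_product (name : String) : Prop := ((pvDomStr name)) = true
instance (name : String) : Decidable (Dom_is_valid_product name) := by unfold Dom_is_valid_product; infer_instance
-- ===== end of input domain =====

-- B groups the patterns into per-length sets, slides one window per occurring length over the
-- lowered name and tests the window stream by set disjointness, instead of A's one substring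
-- search per pattern; same result (alternative, not claimed faster).

-- ===== PORT A =====
def garbagePatterns : List String := ["weight:", "appx.", "/-", ",", "00", "000", "(after", "discount)",
  "ground", "mm", "side", "projection", "length:", "height:", "fastener",
  "installation charge", "cartage", "extra",
  "help protect", "to use of", "wheels to", "use of branded"]

-- the `for pattern in garbage_patterns: if pattern in name_lower: return False` loop
def aPatLoop (low : String) : List String → Bool
  | [] => true
  | p :: rest => if PySem.Str.isIn p low then false else aPatLoop low rest

def is_valid_product (name : String) : Bool :=
  if name.toList = [] || PySem.Str.len name < 5 then false
  else if PySem.Str.strIsdigit name then false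
  else aPatLoop (PySem.Str.lower name) garbagePatterns

-- ===== PORT B =====
-- the module-level GARBAGE_PATTERNS (as char lists: the B port slices on the char-list side)
def altGarbage : List (List Char) := ["weight:".toList, "appx.".toList, "/-".toList, ",".toList,
  "00".toList, "000".toList, "(after".toList, "discount)".toList,
  "ground".toList, "mm".toList, "side".toList, "projection".toList, "length:".toList,
  "height:".toList, "fastener".toList, "installation charge".toList, "cartage".toList,
  "extra".toList, "help protect".toList, "to use of".toList, "wheels to".toList,
  "use of branded".toList]

-- PATTERN_LENGTHS = sorted({len(p) for p in GARBAGE_PATTERNS})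
def patLens : List Int :=
  PySem.List.sorted (PySem.Set.ofList (altGarbage.map (fun p => (p.length : Int)))) (fun x => x) false

-- PATTERNS_BY_LEN[L] = {p for p in GARBAGE_PATTERNS if len(p) == L}
def patsOfLen (L : Int) : PySem.Set (List Char) :=
  PySem.Set.ofList (altGarbage.filter (fun p => (p.length : Int) == L))

-- the generator (low[i:i+L] for i in range(len(low) - L + 1))
def bWindows (low : List Char) (L : Int) : List (List Char) :=
  (PySem.List.pyRange 0 ((low.length : Int) - L + 1) 1).map
    (fun i => PySem.List.slice low (some i) (some (i + L)))

-- the `for L in PATTERN_LENGTHS: if not PATTERNS_BY_LEN[L].isdisjoint(…): return False` loop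
def bLenLoop (low : List Char) : List Int → Bool
  | [] => true
  | L :: rest =>
      if !(PySem.Set.isdisjoint (patsOfLen L) (bWindows low L)) then false
      else bLenLoop low rest

def is_valid_product_alt (name : String) : Bool :=
  if name.toList = [] || PySem.Str.len name < 5 then false
  else if PySem.Str.strIsdigit name then false
  else bLenLoop (PySem.Chars.lower name.toList) patLens

-- ===== PRECONDITION & SPEC =====
def Spec_is_valid_product (name : String) (out : Bool) : Prop := out = is_valid_product_alt name
instance (name : String) (out : Bool) : Decidable (Spec_is_valid_product name out) := by unfold Spec_is_valid_product; infer_instance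

-- ===== CLAIM =====
def Claim_equal_is_valid_product : Prop := ∀ (name : String), Dom_is_valid_product name → Spec_is_valid_product name (is_valid_product name)

-- ===== LEMMAS AND PROOFS =====

lemma aPatLoop_eq_true_iff (low : String) (pats : List String) :
    aPatLoop low pats = true ↔ ∀ p ∈ pats, ¬ p.toList <:+: low.toList := by
  induction pats with
  | nil => simp [aPatLoop]
  | cons p rest ih =>
      rw [aPatLoop]
      by_cases h : PySem.Str.isIn p low = true
      · rw [if_pos h]
        have hinf : p.toList <:+: low.toList :=
          (PySem.Chars.isIn_iff_infix _ _).mp (by simpa using h)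
        simp only [Bool.false_eq_true, false_iff]
        intro hall
        exact (hall p (List.mem_cons_self)) hinf
      · rw [if_neg h]
        have hni : ¬ p.toList <:+: low.toList := by
          intro hc
          exact h (by simpa using (PySem.Chars.isIn_iff_infix p.toList low.toList).mpr hc)
        rw [ih]
        constructor
        · intro hall q hq
          rcases List.mem_cons.mp hq with rfl | hq'
          · exact hni
          · exact hall q hq'
        · intro hall q hq
          exact hall q (List.mem_cons_of_mem _ hq)

lemma slice_infix (low : List Char) (i L : Int) (h0 : 0 ≤ i) (hL : 0 ≤ L) :
    PySem.List.slice low (some i) (some (i + L)) <:+: low := by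
  have : PySem.List.slice low (some i) (some (i + L))
      = (low.drop i.toNat).take L.toNat := by
    have hi : i = (i.toNat : Int) := (Int.toNat_of_nonneg h0).symm
    have hLn : L = (L.toNat : Int) := (Int.toNat_of_nonneg hL).symm
    rw [hi, hLn]
    exact PySem.List.slice_natCast_add low i.toNat L.toNat
  rw [this]
  exact ((low.drop i.toNat).take_prefix L.toNat).isInfix.trans (low.drop_suffix i.toNat).isInfix

lemma mem_patsOfLen (p : List Char) (L : Int) :
    p ∈ patsOfLen L ↔ p ∈ altGarbage ∧ (p.length : Int) = L := by
  unfold patsOfLen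
  rw [PySem.Set.mem_ofList, List.mem_filter]
  simp

-- every garbage pattern is nonempty and its length occurs in patLens
lemma patterns_ok : ∀ p ∈ altGarbage, p ≠ [] ∧ (p.length : Int) ∈ patLens := by decide

lemma infix_iff_mem_windows (low p : List Char) (hne : p ≠ []) :
    p <:+: low ↔ p ∈ bWindows low (p.length : Int) := by
  unfold bWindows
  constructor
  · intro hinf
    obtain ⟨j, hpre⟩ := (PySem.Chars.exists_prefix_drop_iff_isIn p low).mpr
      ((PySem.Chars.isIn_iff_infix p low).mpr hinf)
    have hjl : j + p.length ≤ low.length := by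
      have h1 := hpre.length_le
      rw [List.length_drop] at h1
      have h2 : 1 ≤ p.length := List.length_pos_iff.mpr hne
      omega
    refine List.mem_map.mpr ⟨(j : Int), (PySem.List.mem_pyRange_one).mpr ⟨by positivity, by omega⟩, ?_⟩
    rw [PySem.List.slice_natCast_add low j p.length]
    exact (List.prefix_iff_eq_take.mp hpre).symm
  · intro hmem
    rcases List.mem_map.mp hmem with ⟨i, hi, hsl⟩
    rcases (PySem.List.mem_pyRange_one).mp hi with ⟨h0, _⟩
    rw [← hsl]
    exact slice_infix low i _ h0 (by positivity)

lemma bLenLoop_eq_true_iff (low : List Char) (lens : List Int) :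
    bLenLoop low lens = true ↔ ∀ L ∈ lens, ∀ p ∈ patsOfLen L, p ∉ bWindows low L := by
  induction lens with
  | nil => simp [bLenLoop]
  | cons L rest ih =>
      rw [bLenLoop]
      by_cases h : PySem.Set.isdisjoint (patsOfLen L) (bWindows low L) = true
      · rw [if_neg (by simp [h]), ih]
        have hd := (PySem.Set.isdisjoint_iff _ _).mp h
        constructor
        · intro hall L' hL'
          rcases List.mem_cons.mp hL' with rfl | hL''
          · exact hd
          · exact hall L' hL''
        · intro hall L' hL'
          exact hall L' (List.mem_cons_of_mem _ hL')
      · rw [if_pos (by simp [h])]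
        simp only [Bool.false_eq_true, false_iff]
        intro hall
        exact h ((PySem.Set.isdisjoint_iff _ _).mpr (hall L List.mem_cons_self))

lemma garbage_lists : garbagePatterns.map String.toList = altGarbage := by decide

lemma main_eq (name : String) :
    aPatLoop (PySem.Str.lower name) garbagePatterns
      = bLenLoop (PySem.Chars.lower name.toList) patLens := by
  have hlow : (PySem.Str.lower name).toList = PySem.Chars.lower name.toList :=
    PySem.Str.toList_lower name
  rw [Bool.eq_iff_iff, aPatLoop_eq_true_iff, hlow, bLenLoop_eq_true_iff]
  constructor
  · intro hall L hL p hp hw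
    obtain ⟨hpg, hplen⟩ := (mem_patsOfLen p L).mp hp
    obtain ⟨hne, _⟩ := patterns_ok p hpg
    rw [← garbage_lists] at hpg
    rcases List.mem_map.mp hpg with ⟨q, hq, rfl⟩
    exact hall q hq ((infix_iff_mem_windows _ _ hne).mpr (hplen ▸ hw))
  · intro hall p hp hinf
    have hpg : p.toList ∈ altGarbage := by
      rw [← garbage_lists]; exact List.mem_map_of_mem hp
    obtain ⟨hne, hlen⟩ := patterns_ok p.toList hpg
    exact hall _ hlen p.toList ((mem_patsOfLen _ _).mpr ⟨hpg, rfl⟩)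
      ((infix_iff_mem_windows _ _ hne).mp hinf)

-- ===== VERDICT =====
theorem is_valid_product_spec : Claim_equal_is_valid_product := by
  intro name _
  unfold Spec_is_valid_product is_valid_product is_valid_product_alt
  split_ifs
  · rfl
  · rfl
  · exact main_eq name
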